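-- pv_equiv track=rewrite | github.com/suryanjain14/prat | bringimg_gun_to_fight.py | replicated_mirror
-- ===== SOURCE A (Python) =====
-- def replicated_mirror(mirrored_room, dimensions, distance):
--     temp_mirror = []
--     for i in range(len(mirrored_room)):
--         values = []
--         for j in range(-(distance // dimensions[i]) - 1, (distance // dimensions[i] + 2)):
--             values.append(mirroring(j, mirrored_room[i], dimensions[i]))
--         temp_mirror.append(values)
--     return temp_mirror
--
-- def mirroring(mirror, coordinates, dimensions):
--     transformed_res = coordinates
--     mirror_rotation = [2 * coordinates, 2 * (dimensions - coordinates)]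
--     if mirror < 0:
--         for i in range(mirror, 0):
--             transformed_res -= mirror_rotation[(i + 1) % 2]
--     else:
--         for i in range(mirror, 0, -1):
--             transformed_res += mirror_rotation[i % 2]
--     return transformed_res
-- ===== SOURCE B (Python) =====
-- def replicated_mirror(mirrored_room, dimensions, distance):
--     # Closed form: the j-th mirror image of coordinate c in a box of size d is
--     # j*d + c for even j and (j+1)*d - c for odd j; O(1) per image instead of O(|j|).
--     result = []
--     for c, d in zip(mirrored_room, dimensions):
--         k = distance // d
--         result.append([j * d + c if j % 2 == 0 else (j + 1) * d - c
--                        for j in range(-k - 1, k + 2)])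
--     return result
-- ===== Notes on version B (the rewrite author's own statement) =====
-- stated objective: faster
-- what changed: Replaced the per-image O(|j|) accumulation loop in mirroring() with the closed-form alternating formula (j*d + c for even j, (j+1)*d - c for odd j), and iterates coordinate/dimension pairs directly via zip instead of index loops.
import Mathlib
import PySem

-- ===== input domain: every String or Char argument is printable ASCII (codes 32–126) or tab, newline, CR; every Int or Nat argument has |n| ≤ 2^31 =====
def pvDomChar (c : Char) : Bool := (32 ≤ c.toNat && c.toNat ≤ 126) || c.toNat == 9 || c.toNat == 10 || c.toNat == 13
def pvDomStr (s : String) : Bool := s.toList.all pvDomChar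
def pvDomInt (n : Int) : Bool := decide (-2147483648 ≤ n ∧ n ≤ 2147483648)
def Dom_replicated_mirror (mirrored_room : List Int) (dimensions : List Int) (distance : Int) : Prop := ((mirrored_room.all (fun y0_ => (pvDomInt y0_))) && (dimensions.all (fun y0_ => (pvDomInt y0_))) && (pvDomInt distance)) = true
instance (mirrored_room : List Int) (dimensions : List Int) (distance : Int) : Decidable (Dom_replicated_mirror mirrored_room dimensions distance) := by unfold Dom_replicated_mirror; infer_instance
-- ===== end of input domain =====

-- B replaces A's per-image accumulation loop by the closed-form alternating formula
-- (j*d + c for even j, (j+1)*d - c for odd j): a faster algorithm, same values.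

-- ===== PORT A =====
-- literal port of A's helper 'mirroring'; the rot-list lookup index is always 0 or 1,
-- so pyGetD with default 0 is exact here
def mirroringA (mirror coordinates dimensions : Int) : Int :=
  let rot : List Int := [2 * coordinates, 2 * (dimensions - coordinates)]
  if mirror < 0 then
    (PySem.List.pyRange mirror 0 1).foldl
      (fun acc i => acc - PySem.List.pyGetD rot (PySem.Int.mod (i + 1) 2) 0) coordinates
  else
    (PySem.List.pyRange mirror 0 (-1)).foldl
      (fun acc i => acc + PySem.List.pyGetD rot (PySem.Int.mod i 2) 0) coordinates

def replicated_mirror (mirrored_room : List Int) (dimensions : List Int) (distance : Int) : List (List Int) :=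
  (List.range mirrored_room.length).foldl
    (fun temp_mirror (i : Nat) =>
      let c := PySem.List.pyGetD mirrored_room (i : Int) 0
      let d := PySem.List.pyGetD dimensions (i : Int) 0
      let k := PySem.Int.floordiv distance d
      temp_mirror ++ [(PySem.List.pyRange (-k - 1) (k + 2) 1).foldl
        (fun values j => values ++ [mirroringA j c d]) []]) []

-- ===== PORT B =====
def replicated_mirror_alt (mirrored_room : List Int) (dimensions : List Int) (distance : Int) : List (List Int) :=
  (mirrored_room.zip dimensions).map (fun cd =>
    let k := PySem.Int.floordiv distance cd.2
    (PySem.List.pyRange (-k - 1) (k + 2) 1).map (fun j =>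
      if PySem.Int.mod j 2 = 0 then j * cd.2 + cd.1 else (j + 1) * cd.2 - cd.1))

-- ===== PRECONDITION & SPEC =====
-- Pre_ excludes exactly the inputs where Python A raises: an index past the end of
-- dimensions (IndexError) or a zero dimension used as divisor (ZeroDivisionError).
def Pre_replicated_mirror (mirrored_room : List Int) (dimensions : List Int) (distance : Int) : Prop :=
  mirrored_room.length ≤ dimensions.length ∧
  ∀ x ∈ dimensions.take mirrored_room.length, x ≠ 0

instance (mirrored_room : List Int) (dimensions : List Int) (distance : Int) : Decidable (Pre_replicated_mirror mirrored_room dimensions distance) := by unfold Pre_replicated_mirror; infer_instance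

def pvWitness_replicated_mirror : List Int × List Int × Int := ([1, 2], [3, 4], 5)

def Spec_replicated_mirror (mirrored_room : List Int) (dimensions : List Int) (distance : Int) (out : List (List Int)) : Prop := out = replicated_mirror_alt mirrored_room dimensions distance
instance (mirrored_room : List Int) (dimensions : List Int) (distance : Int) (out : List (List Int)) : Decidable (Spec_replicated_mirror mirrored_room dimensions distance out) := by unfold Spec_replicated_mirror; infer_instance

-- ===== CLAIM (what is proved, stated in full; the proofs are below) =====
def Claim_equal_replicated_mirror : Prop := ∀ (mirrored_room : List Int) (dimensions : List Int) (distance : Int), Dom_replicated_mirror mirrored_room dimensions distance → Pre_replicated_mirror mirrored_room dimensions distance → Spec_replicated_mirror mirrored_room dimensions distance (replicated_mirror mirrored_room dimensions distance)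

-- ===== LEMMAS AND PROOFS =====

lemma foldl_add_shift (f : Int → Int) : ∀ (l : List Int) (x y : Int),
    l.foldl (fun a i => a + f i) (x + y) = x + l.foldl (fun a i => a + f i) y := by
  intro l
  induction l with
  | nil => intro x y; rfl
  | cons h t ih => intro x y; simpa [add_assoc] using ih x (y + f h)

lemma foldl_sub_shift (f : Int → Int) : ∀ (l : List Int) (x y : Int),
    l.foldl (fun a i => a - f i) (x + y) = x + l.foldl (fun a i => a - f i) y := by
  intro l
  induction l with
  | nil => intro x y; rfl
  | cons h t ih => intro x y; simpa [add_sub_assoc] using ih x (y - f h)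

lemma foldl_append_singleton {α β : Type} (f : α → β) : ∀ (l : List α) (acc : List β),
    l.foldl (fun vs j => vs ++ [f j]) acc = acc ++ l.map f := by
  intro l
  induction l with
  | nil => intro acc; simp
  | cons h t ih => intro acc; simp [ih]

lemma mirroringA_pos (c d : Int) : ∀ (n : Nat),
    mirroringA (n : Int) c d =
      if PySem.Int.mod (n : Int) 2 = 0 then (n : Int) * d + c else ((n : Int) + 1) * d - c := by
  intro n
  induction n with
  | zero => simp [mirroringA, PySem.List.pyRange_neg_one_eq_nil, PySem.Int.mod]
  | succ m ih =>
    have hlt : (0 : Int) < ((m : Int) + 1) := by positivity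
    have hcons := PySem.List.pyRange_neg_one_cons (a := ((m : Int) + 1)) (b := 0) hlt
    have hnotneg : ¬ (((m : Int) + 1) < 0) := by omega
    have hnotneg' : ¬ ((m : Int) < 0) := by omega
    have hmod : PySem.Int.mod ((m : Int) + 1) 2 = ((m : Int) + 1) % 2 :=
      PySem.Int.mod_eq_emod_of_pos (by norm_num)
    have hmodm : PySem.Int.mod (m : Int) 2 = (m : Int) % 2 :=
      PySem.Int.mod_eq_emod_of_pos (by norm_num)
    unfold mirroringA at ih ⊢
    rw [if_neg hnotneg'] at ih
    push_cast
    rw [if_neg hnotneg]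
    rw [hcons]
    simp only [List.foldl_cons, show ((m : Int) + 1) - 1 = (m : Int) by ring]
    rw [show c + PySem.List.pyGetD [2 * c, 2 * (d - c)] (PySem.Int.mod ((m : Int) + 1) 2) 0
          = PySem.List.pyGetD [2 * c, 2 * (d - c)] (PySem.Int.mod ((m : Int) + 1) 2) 0 + c by ring,
        foldl_add_shift, ih]
    rcases Int.emod_two_eq_zero_or_one (m : Int) with he | he
    · have h1 : ((m : Int) + 1) % 2 = 1 := by omega
      rw [hmod, hmodm] at *
      simp [he, h1, PySem.List.pyGetD]
      ring
    · have h1 : ((m : Int) + 1) % 2 = 0 := by omega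
      rw [hmod, hmodm] at *
      simp [he, h1, PySem.List.pyGetD]
      ring

lemma mirroringA_neg (c d : Int) : ∀ (n : Nat),
    mirroringA (-((n : Int) + 1)) c d =
      if PySem.Int.mod (-((n : Int) + 1)) 2 = 0
      then (-((n : Int) + 1)) * d + c else ((-((n : Int) + 1)) + 1) * d - c := by
  intro n
  induction n with
  | zero =>
    simp [mirroringA, PySem.List.pyRange_one_cons (a := (-1 : Int)) (b := 0) (by norm_num),
      PySem.List.pyRange_one_eq_nil (le_refl (0 : Int)), PySem.Int.mod, PySem.List.pyGetD]
    ring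
  | succ m ih =>
    have hneg : (-((m : Int) + 1 + 1)) < 0 := by omega
    have hneg' : (-((m : Int) + 1)) < 0 := by omega
    have hcons := PySem.List.pyRange_one_cons (a := (-((m : Int) + 1 + 1))) (b := 0) hneg
    unfold mirroringA at ih ⊢
    rw [if_pos hneg'] at ih
    push_cast
    rw [if_pos hneg, hcons]
    simp only [List.foldl_cons, show (-((m : Int) + 1 + 1)) + 1 = -((m : Int) + 1) by ring]
    rw [show c - PySem.List.pyGetD [2 * c, 2 * (d - c)] (PySem.Int.mod (-((m : Int) + 1)) 2) 0
          = (- PySem.List.pyGetD [2 * c, 2 * (d - c)] (PySem.Int.mod (-((m : Int) + 1)) 2) 0) + c by ring,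
        foldl_sub_shift, ih]
    have hmod1 : PySem.Int.mod (-((m : Int) + 1)) 2 = (-((m : Int) + 1)) % 2 :=
      PySem.Int.mod_eq_emod_of_pos (by norm_num)
    have hmod2 : PySem.Int.mod (-((m : Int) + 1 + 1)) 2 = (-((m : Int) + 1 + 1)) % 2 :=
      PySem.Int.mod_eq_emod_of_pos (by norm_num)
    rcases Int.emod_two_eq_zero_or_one (-((m : Int) + 1)) with he | he
    · have h3 : (-((m : Int) + 1 + 1)) % 2 = 1 := by omega
      simp only [hmod1, hmod2, he, h3]
      simp [PySem.List.pyGetD]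
      ring
    · have h3 : (-((m : Int) + 1 + 1)) % 2 = 0 := by omega
      simp only [hmod1, hmod2, he, h3]
      simp [PySem.List.pyGetD]
      ring

lemma mirroringA_closed (j c d : Int) :
    mirroringA j c d = if PySem.Int.mod j 2 = 0 then j * d + c else (j + 1) * d - c := by
  by_cases hj : 0 ≤ j
  · obtain ⟨n, rfl⟩ := Int.eq_ofNat_of_zero_le hj
    exact mirroringA_pos c d n
  · obtain ⟨n, hn⟩ : ∃ n : Nat, j = -((n : Int) + 1) := ⟨(-j - 1).toNat, by omega⟩
    rw [hn]; exact mirroringA_neg c d n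

-- ===== VERDICT (by name: the statement is the Claim_ definition above) =====
theorem replicated_mirror_spec : Claim_equal_replicated_mirror := by
  intro mr dims dist _ hpre
  obtain ⟨hlen, -⟩ := hpre
  unfold Spec_replicated_mirror replicated_mirror replicated_mirror_alt
  simp only [foldl_append_singleton, List.nil_append]
  apply List.ext_getElem
  · simp [List.length_zip]; omega
  · intro i h1 h2
    have hi : i < mr.length := by simpa using h1
    have hi' : i < dims.length := by omega
    simp only [List.getElem_map, List.getElem_range, List.getElem_zip]
    simp [mirroringA_closed, hi, hi']
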